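-- pv_equiv track=rewrite | github.com/ChicagoHAI/learning-from-rationales | util/pseudoexample_util.py | calculate_sentence_token_spans
-- ===== SOURCE A (Python) =====
-- def calculate_sentence_token_spans(sentence_ids):
-- 	spans = []
-- 	current_span = [0,1]
-- 	current_id = sentence_ids[0]
-- 	sentence_type_ids = []
-- 	sentence_type_id = 0
-- 	for i in range(1, len(sentence_ids)):
--
-- 		if sentence_ids[i] == current_id:
-- 			current_span[1] += 1
-- 		else:
-- 			spans.append(current_span)
-- 			current_span= [current_span[1], current_span[1]+1]
-- 		current_id= sentence_ids[i]
--
-- 	spans.append(current_span)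
--
--
-- 	return spans
-- ===== SOURCE B (Python) =====
-- def calculate_sentence_token_spans(sentence_ids):
-- 	# Two phases: build a run-length encoding of sentence_ids, then turn run
-- 	# lengths into [start, end) spans by a prefix-sum scan.
-- 	runs = []
-- 	for v in sentence_ids:
-- 		if runs and runs[-1][0] == v:
-- 			runs[-1][1] += 1
-- 		else:
-- 			runs.append([v, 1])
-- 	spans = []
-- 	start = 0
-- 	for _, length in runs:
-- 		spans.append([start, start + length])
-- 		start += length
-- 	return spans
-- ===== Notes on version B (the rewrite author's own statement) =====
-- stated objective: alternative
-- what changed: B first builds a run-length encoding of sentence_ids and then converts run lengths to spans by a prefix-sum scan, instead of A's single index loop that mutates a current span in place.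
import Mathlib
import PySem

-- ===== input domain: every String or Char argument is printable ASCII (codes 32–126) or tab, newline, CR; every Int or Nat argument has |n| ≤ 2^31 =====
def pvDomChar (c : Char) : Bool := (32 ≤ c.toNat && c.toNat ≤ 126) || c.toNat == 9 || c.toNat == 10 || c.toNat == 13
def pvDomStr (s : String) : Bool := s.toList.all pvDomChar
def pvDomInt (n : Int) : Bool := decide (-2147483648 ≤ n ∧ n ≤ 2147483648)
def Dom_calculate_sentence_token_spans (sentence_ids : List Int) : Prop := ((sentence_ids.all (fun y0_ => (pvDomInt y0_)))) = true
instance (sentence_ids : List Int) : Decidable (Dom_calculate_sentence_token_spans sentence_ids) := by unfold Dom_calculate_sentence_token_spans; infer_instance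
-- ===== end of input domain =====

-- B replaces A's in-place span loop by a two-phase run-length-encode + prefix-sum scan (alternative decomposition, same cost).


-- ===== PORT A =====
-- A's loop body: state = (spans, current_span as a pair, current_id); x = sentence_ids[i]
def pvStepA (st : List (List Int) × (Int × Int) × Int) (x : Int) : List (List Int) × (Int × Int) × Int :=
  if x = st.2.2 then (st.1, (st.2.1.1, st.2.1.2 + 1), x)
  else (st.1 ++ [[st.2.1.1, st.2.1.2]], (st.2.1.2, st.2.1.2 + 1), x)

def calculate_sentence_token_spans (sentence_ids : List Int) : List (List Int) :=
  -- current_id = first element; exact under Pre_ (nonempty input)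
  let current_id : Int := PySem.List.pyGetD sentence_ids 0 0
  let st := (PySem.List.pyRange 1 (sentence_ids.length : Int) 1).foldl
      (fun acc i => pvStepA acc (PySem.List.pyGetD sentence_ids i 0))
      ([], (0, 1), current_id)
  st.1 ++ [[st.2.1.1, st.2.1.2]]

-- ===== PORT B =====
-- phase 1 step: extend the last run or start a new one (runs[-1][1] += 1 becomes dropLast ++ [...])
def pvRleStep (runs : List (Int × Int)) (v : Int) : List (Int × Int) :=
  match runs.getLast? with
  | some (w, c) => if w = v then runs.dropLast ++ [(w, c + 1)] else runs ++ [(v, 1)]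
  | none => [(v, 1)]

-- phase 2 step: state = (spans, start)
def pvScanStep (st : List (List Int) × Int) (r : Int × Int) : List (List Int) × Int :=
  (st.1 ++ [[st.2, st.2 + r.2]], st.2 + r.2)

def calculate_sentence_token_spans_alt (sentence_ids : List Int) : List (List Int) :=
  let runs := sentence_ids.foldl pvRleStep []
  (runs.foldl pvScanStep ([], 0)).1

-- ===== PRECONDITION & SPEC =====
-- Pre_ excludes only the empty list, on which A raises IndexError reading the first element.
def Pre_calculate_sentence_token_spans (sentence_ids : List Int) : Prop := sentence_ids ≠ []
instance (sentence_ids : List Int) : Decidable (Pre_calculate_sentence_token_spans sentence_ids) := by unfold Pre_calculate_sentence_token_spans; infer_instance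

def pvWitness_calculate_sentence_token_spans : List Int := [1, 1, 2, 2, 2, 3]

def Spec_calculate_sentence_token_spans (sentence_ids : List Int) (out : List (List Int)) : Prop := out = calculate_sentence_token_spans_alt sentence_ids
instance (sentence_ids : List Int) (out : List (List Int)) : Decidable (Spec_calculate_sentence_token_spans sentence_ids out) := by unfold Spec_calculate_sentence_token_spans; infer_instance

-- ===== CLAIM (what is proved, stated in full; the proofs are below) =====
def Claim_equal_calculate_sentence_token_spans : Prop := ∀ (sentence_ids : List Int), Dom_calculate_sentence_token_spans sentence_ids → Pre_calculate_sentence_token_spans sentence_ids → Spec_calculate_sentence_token_spans sentence_ids (calculate_sentence_token_spans sentence_ids)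

-- ===== LEMMAS AND PROOFS =====

-- sum of run lengths
def pvSumLen (runs : List (Int × Int)) : Int := (runs.map (·.2)).sum

-- pure scan: span list produced by phase 2 starting at offset st
def pvScanGo (st : Int) : List (Int × Int) → List (List Int)
  | [] => []
  | r :: rs => [st, st + r.2] :: pvScanGo (st + r.2) rs

theorem pvSumLen_append (rs : List (Int × Int)) (r : Int × Int) :
    pvSumLen (rs ++ [r]) = pvSumLen rs + r.2 := by
  simp [pvSumLen]

theorem pvScanGo_append (rs : List (Int × Int)) (r : Int × Int) (st : Int) :
    pvScanGo st (rs ++ [r]) = pvScanGo st rs ++ [[st + pvSumLen rs, st + pvSumLen rs + r.2]] := by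
  induction rs generalizing st with
  | nil => simp [pvScanGo, pvSumLen]
  | cons a as ih =>
      simp only [List.cons_append, pvScanGo, ih, pvSumLen, List.map_cons, List.sum_cons]
      ring_nf

theorem pvScan_fold (rs : List (Int × Int)) (spans : List (List Int)) (st : Int) :
    (rs.foldl pvScanStep (spans, st)).1 = spans ++ pvScanGo st rs := by
  induction rs generalizing spans st with
  | nil => simp [pvScanGo]
  | cons r t ih => simp [List.foldl_cons, pvScanStep, pvScanGo, ih]

theorem pvRleStep_concat (runs : List (Int × Int)) (v c x : Int) :
    pvRleStep (runs ++ [(v, c)]) x =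
      if v = x then runs ++ [(v, c + 1)] else runs ++ [(v, c)] ++ [(x, 1)] := by
  simp [pvRleStep]

-- Main invariant: running A's loop from a state corresponding to run list runs ++ [(v,c)]
-- produces the spans that B's two phases produce.
theorem pvMain (xs : List Int) (runs : List (Int × Int)) (v c : Int) :
    (let st := xs.foldl pvStepA (pvScanGo 0 runs, (pvSumLen runs, pvSumLen runs + c), v)
     st.1 ++ [[st.2.1.1, st.2.1.2]])
    = pvScanGo 0 (xs.foldl pvRleStep (runs ++ [(v, c)])) := by
  induction xs generalizing runs v c with
  | nil =>
      simp [pvScanGo_append]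
  | cons x t ih =>
      simp only [List.foldl_cons, pvRleStep_concat]
      by_cases hx : x = v
      · simp only [pvStepA, hx, if_true]
        have := ih runs v (c + 1)
        simpa [add_assoc] using this
      · have hvx : ¬ v = x := fun h => hx h.symm
        simp only [pvStepA, if_neg hx, eq_false hvx, if_false]
        have := ih (runs ++ [(v, c)]) x 1
        simp only [pvSumLen_append, pvScanGo_append, zero_add] at this
        exact this

theorem pvA_cons (x : Int) (xs : List Int) :
    calculate_sentence_token_spans (x :: xs)
      = (let st := xs.foldl pvStepA ([], (0, 1), x); st.1 ++ [[st.2.1.1, st.2.1.2]]) := by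
  simp only [calculate_sentence_token_spans]
  rw [PySem.List.foldl_pyRange_pyGetD' (x :: xs) 0 pvStepA ([], (0, 1), PySem.List.pyGetD (x :: xs) 0 0) (by omega : (0:Int) ≤ 1)]
  simp [PySem.List.pyGetD_zero_cons]

-- ===== VERDICT (by name: the statement is the Claim_ definition above) =====
theorem calculate_sentence_token_spans_spec : Claim_equal_calculate_sentence_token_spans := by
  intro ids _ hpre
  unfold Spec_calculate_sentence_token_spans
  match ids with
  | [] => exact absurd rfl hpre
  | x :: xs =>
      rw [pvA_cons]
      unfold calculate_sentence_token_spans_alt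
      have h := pvMain xs [] x 1
      simp only [pvScanGo, pvSumLen, List.map_nil, List.sum_nil, List.nil_append, zero_add] at h
      rw [h]
      simp only [List.foldl_cons, pvRleStep, List.getLast?_nil]
      rw [pvScan_fold]
      simp
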